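-- pv_equiv track=rewrite | github.com/iashvini/soul-nakshatra-frontend | pyjhora_server.py | compute_approx_ashtakavarga
-- ===== SOURCE A (Python) =====
-- def compute_approx_ashtakavarga(planet_positions):
--     bindus = []
--     for i in range(12):
--         house_num = i + 1
--         planets_count = sum(1 for p in planet_positions if p['house'] == house_num)
--         points = 25 + planets_count * 3
--         if house_num in (1, 4, 7, 10):
--             points += 3
--         elif house_num in (3, 6, 11):
--             points += 2
--         elif house_num in (8, 12):
--             points -= 3
--         points = max(min(points, 40), 15)
--         bindus.append({'house': house_num, 'points': points})
--     return bindus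
-- ===== SOURCE B (Python) =====
-- # Base points per house: 25 plus the fixed house adjustment (+3 / +2 / -3 / 0).
-- # Every base value is >= 22 and planets only add points, so the lower clamp at 15 never fires.
-- _BASE_POINTS = [28, 25, 27, 28, 25, 27, 28, 22, 25, 28, 27, 22]
--
--
-- def compute_approx_ashtakavarga(planet_positions):
--     pts = list(_BASE_POINTS)
--     for p in planet_positions:
--         h = p['house']
--         if 1 <= h <= 12:
--             pts[h - 1] += 3
--     return [{'house': h, 'points': min(v, 40)}
--             for h, v in enumerate(pts, start=1)]
-- ===== Notes on version B (the rewrite author's own statement) =====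
-- stated objective: alternative
-- what changed: B scatters: it starts from a static 12-entry base-points table (25 + house adjustment precomputed) and makes one pass over planet_positions adding 3 to the hit house's slot, then emits the rows with a single upper clamp, instead of A's per-house rescan-and-count with an if/elif adjustment chain and two-sided clamp.
import Mathlib
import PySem

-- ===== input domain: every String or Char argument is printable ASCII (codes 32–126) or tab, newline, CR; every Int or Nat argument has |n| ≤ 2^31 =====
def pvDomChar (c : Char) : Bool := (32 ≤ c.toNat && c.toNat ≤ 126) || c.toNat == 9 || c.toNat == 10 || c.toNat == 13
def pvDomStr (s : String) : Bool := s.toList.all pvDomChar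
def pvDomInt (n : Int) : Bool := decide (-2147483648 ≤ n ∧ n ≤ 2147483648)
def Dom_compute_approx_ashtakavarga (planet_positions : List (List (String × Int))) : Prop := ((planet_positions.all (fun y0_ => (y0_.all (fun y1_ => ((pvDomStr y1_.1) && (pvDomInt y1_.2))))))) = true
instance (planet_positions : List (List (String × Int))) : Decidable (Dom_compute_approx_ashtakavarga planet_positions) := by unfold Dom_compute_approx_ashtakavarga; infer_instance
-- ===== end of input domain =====

-- B replaces A's per-house rescan-and-count with a scatter pass: a static 12-entry base table, +3 at the hit slot per planet, then one upper clamp (objective: alternative).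


-- ===== PORT A =====
def compute_approx_ashtakavarga (planet_positions : List (List (String × Int))) : List (List (String × Int)) :=
  (PySem.List.pyRange 0 12 1).foldl (fun bindus i =>
    let house_num : Int := i + 1
    let planets_count : Int :=
      (planet_positions.map (fun p =>
        if (PySem.Dict.mk p).get? "house" = some house_num then (1 : Int) else 0)).sum
    let points : Int := 25 + planets_count * 3
    let points : Int :=
      if house_num = 1 ∨ house_num = 4 ∨ house_num = 7 ∨ house_num = 10 then points + 3
      else if house_num = 3 ∨ house_num = 6 ∨ house_num = 11 then points + 2
      else if house_num = 8 ∨ house_num = 12 then points - 3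
      else points
    let points : Int := max (min points 40) 15
    bindus ++ [[("house", house_num), ("points", points)]]) []

-- ===== PORT B =====
def pvBasePoints : List Int := [28, 25, 27, 28, 25, 27, 28, 22, 25, 28, 27, 22]

def pvScatter (pts : List Int) (p : List (String × Int)) : List Int :=
  let h : Int := (((PySem.Dict.mk p).get? "house").getD 0)
  if 1 ≤ h ∧ h ≤ 12 then pts.set (h - 1).toNat (pts.getD (h - 1).toNat 0 + 3) else pts

def compute_approx_ashtakavarga_alt (planet_positions : List (List (String × Int))) : List (List (String × Int)) :=
  let pts : List Int := planet_positions.foldl pvScatter pvBasePoints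
  (PySem.List.enumerate pts 1).map (fun hv => [("house", hv.1), ("points", min hv.2 40)])

-- ===== PRECONDITION & SPEC =====
-- Pre_ excludes inputs where some planet dict lacks the key 'house': there A raises KeyError.
def Pre_compute_approx_ashtakavarga (planet_positions : List (List (String × Int))) : Prop :=
  (planet_positions.all (fun p => ((PySem.Dict.mk p).get? "house").isSome)) = true
instance (planet_positions : List (List (String × Int))) : Decidable (Pre_compute_approx_ashtakavarga planet_positions) := by unfold Pre_compute_approx_ashtakavarga; infer_instance

def pvWitness_compute_approx_ashtakavarga : (List (List (String × Int))) := [[("house", 1)], [("house", 7)]]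

def Spec_compute_approx_ashtakavarga (planet_positions : List (List (String × Int))) (out : List (List (String × Int))) : Prop := out = compute_approx_ashtakavarga_alt planet_positions
instance (planet_positions : List (List (String × Int))) (out : List (List (String × Int))) : Decidable (Spec_compute_approx_ashtakavarga planet_positions out) := by unfold Spec_compute_approx_ashtakavarga; infer_instance

-- ===== CLAIM =====
def Claim_equal_compute_approx_ashtakavarga : Prop := ∀ (planet_positions : List (List (String × Int))), Dom_compute_approx_ashtakavarga planet_positions → Pre_compute_approx_ashtakavarga planet_positions → Spec_compute_approx_ashtakavarga planet_positions (compute_approx_ashtakavarga planet_positions)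

-- ===== LEMMAS AND PROOFS =====

-- A's 0/1-sum count of planets in house h.
def pvCnt (pp : List (List (String × Int))) (h : Int) : Int :=
  (pp.map (fun p => if (PySem.Dict.mk p).get? "house" = some h then (1 : Int) else 0)).sum

theorem pvCnt_def (pp : List (List (String × Int))) (h : Int) :
    (pp.map (fun p => if (PySem.Dict.mk p).get? "house" = some h then (1 : Int) else 0)).sum = pvCnt pp h := rfl

theorem pvCnt_nonneg (pp : List (List (String × Int))) (h : Int) : 0 ≤ pvCnt pp h := by
  induction pp with
  | nil => simp [pvCnt]
  | cons p rest ih =>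
    simp only [pvCnt, List.map_cons, List.sum_cons] at *
    split <;> omega

theorem pvCnt_cons (p : List (String × Int)) (rest : List (List (String × Int))) (h : Int) :
    pvCnt (p :: rest) h = (if (PySem.Dict.mk p).get? "house" = some h then (1 : Int) else 0) + pvCnt rest h := by
  simp [pvCnt]

-- The scatter fold over any 12-slot table adds 3 per planet to its house's slot.
theorem pv_scatter_eq (pp : List (List (String × Int)))
    (hpre : ∀ p ∈ pp, ((PySem.Dict.mk p).get? "house").isSome) :
    ∀ (a1 a2 a3 a4 a5 a6 a7 a8 a9 a10 a11 a12 : Int),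
    pp.foldl pvScatter [a1, a2, a3, a4, a5, a6, a7, a8, a9, a10, a11, a12] =
      [a1 + 3 * pvCnt pp 1, a2 + 3 * pvCnt pp 2, a3 + 3 * pvCnt pp 3, a4 + 3 * pvCnt pp 4,
       a5 + 3 * pvCnt pp 5, a6 + 3 * pvCnt pp 6, a7 + 3 * pvCnt pp 7, a8 + 3 * pvCnt pp 8,
       a9 + 3 * pvCnt pp 9, a10 + 3 * pvCnt pp 10, a11 + 3 * pvCnt pp 11, a12 + 3 * pvCnt pp 12] := by
  induction pp with
  | nil => intro a1 a2 a3 a4 a5 a6 a7 a8 a9 a10 a11 a12; simp [pvCnt]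
  | cons p rest ih =>
    intro a1 a2 a3 a4 a5 a6 a7 a8 a9 a10 a11 a12
    obtain ⟨v, hv⟩ := Option.isSome_iff_exists.mp (hpre p (by simp))
    have ih' := ih (fun q hq => hpre q (by simp [hq]))
    simp only [List.foldl_cons]
    by_cases hr : 1 ≤ v ∧ v ≤ 12
    · obtain ⟨hvl, hvu⟩ := hr
      interval_cases v <;>
        simp_all [pvScatter, pvCnt_cons, List.set, List.getD] <;> ring_nf
    · have hne : ∀ j : Int, 1 ≤ j → j ≤ 12 →
          (if (PySem.Dict.mk p).get? "house" = some j then (1 : Int) else 0) = 0 := by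
        intro j h1 h2
        rw [hv]
        split
        · next heq => exfalso; have := Option.some.inj heq; omega
        · rfl
      have hstep : pvScatter [a1, a2, a3, a4, a5, a6, a7, a8, a9, a10, a11, a12] p =
          [a1, a2, a3, a4, a5, a6, a7, a8, a9, a10, a11, a12] := by
        simp [pvScatter, hv, hr]
      rw [hstep, ih']
      simp only [pvCnt_cons]
      rw [hne 1 (by omega) (by omega), hne 2 (by omega) (by omega), hne 3 (by omega) (by omega),
          hne 4 (by omega) (by omega), hne 5 (by omega) (by omega), hne 6 (by omega) (by omega),
          hne 7 (by omega) (by omega), hne 8 (by omega) (by omega), hne 9 (by omega) (by omega),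
          hne 10 (by omega) (by omega), hne 11 (by omega) (by omega), hne 12 (by omega) (by omega)]
      ring_nf

-- ===== VERDICT =====
theorem compute_approx_ashtakavarga_spec : Claim_equal_compute_approx_ashtakavarga := by
  intro pp _ hpre
  have hpre' : ∀ p ∈ pp, ((PySem.Dict.mk p).get? "house").isSome := by
    intro p hp; exact List.all_eq_true.mp hpre p hp
  show compute_approx_ashtakavarga pp = compute_approx_ashtakavarga_alt pp
  unfold compute_approx_ashtakavarga compute_approx_ashtakavarga_alt
  rw [show pvBasePoints = [28, 25, 27, 28, 25, 27, 28, 22, 25, 28, 27, 22] from rfl]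
  rw [pv_scatter_eq pp hpre']
  have hr0 : PySem.List.pyRange 0 12 1 = [0,1,2,3,4,5,6,7,8,9,10,11] := by decide
  rw [hr0]
  simp only [List.foldl_cons, List.foldl_nil, PySem.List.enumerate_cons, PySem.List.enumerate_nil,
    List.map_cons, List.map_nil]
  norm_num [pvCnt_def]
  have n1 := pvCnt_nonneg pp 1; have n2 := pvCnt_nonneg pp 2; have n3 := pvCnt_nonneg pp 3
  have n4 := pvCnt_nonneg pp 4; have n5 := pvCnt_nonneg pp 5; have n6 := pvCnt_nonneg pp 6
  have n7 := pvCnt_nonneg pp 7; have n8 := pvCnt_nonneg pp 8; have n9 := pvCnt_nonneg pp 9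
  have n10 := pvCnt_nonneg pp 10; have n11 := pvCnt_nonneg pp 11; have n12 := pvCnt_nonneg pp 12
  refine ⟨by omega, by omega, by omega, by omega, by omega, by omega, by omega, by omega, by omega, by omega, by omega, by omega⟩
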